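-- pv_equiv track=rewrite | github.com/redchupa/kr_finance_kit | custom_components/kr_finance_kit/config_flow.py | _csv_to_tickers_and_labels
-- ===== SOURCE A (Python) =====
-- def _csv_to_tickers_and_labels(raw: str | None) -> tuple[list[str], dict[str, str]]:
--     """Parse a "TICKER:label, TICKER, TICKER:라벨" input.
--
--     Splits on the first colon per segment so multi-symbol tickers that
--     happen to contain "=" (FX: EUR=X) and "-" (crypto: BTC-USD) pass
--     through untouched. Returns ``(tickers, labels)`` where ``labels``
--     maps the upper-cased ticker code to its user-supplied friendly
--     label. Tickers without an explicit ":label" are still in the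
--     ``tickers`` list but absent from ``labels`` — the integration will
--     fill those in from yfinance .info on save.
--     """
--     if not raw:
--         return [], {}
--     tickers: list[str] = []
--     labels: dict[str, str] = {}
--     for raw_seg in raw.split(","):
--         seg = raw_seg.strip()
--         if not seg:
--             continue
--         if ":" in seg:
--             code, _, lbl = seg.partition(":")
--             code = code.strip().upper()
--             lbl = lbl.strip()
--             if not code:
--                 continue
--             tickers.append(code)
--             if lbl:
--                 labels[code] = lbl
--         else:
--             tickers.append(seg.upper())
--     return tickers, labels
-- ===== SOURCE B (Python) =====
-- def _csv_to_tickers_and_labels(raw):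
--     """One-pass character state machine: no split/strip-per-segment/partition;
--     a trailing ',' sentinel flushes the last segment."""
--     if not raw:
--         return [], {}
--     tickers, labels = [], {}
--     code_buf, lbl_buf, in_lbl = [], [], False
--     for ch in raw + ",":
--         if ch == ",":
--             code = "".join(code_buf).strip().upper()
--             if code:
--                 tickers.append(code)
--                 lbl = "".join(lbl_buf).strip()
--                 if lbl:
--                     labels[code] = lbl
--             code_buf, lbl_buf, in_lbl = [], [], False
--         elif ch == ":" and not in_lbl:
--             in_lbl = True
--         elif in_lbl:
--             lbl_buf.append(ch)
--         else:
--             code_buf.append(ch)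
--     return tickers, labels
-- ===== Notes on version B (the rewrite author's own statement) =====
-- stated objective: alternative
-- what changed: A splits on commas and strips/partitions each segment with string methods; B is a single character-level state machine over the raw text plus a trailing comma sentinel, maintaining code/label buffers and an in-label flag and flushing the pending segment at each comma, never calling split or partition.
import Mathlib
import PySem

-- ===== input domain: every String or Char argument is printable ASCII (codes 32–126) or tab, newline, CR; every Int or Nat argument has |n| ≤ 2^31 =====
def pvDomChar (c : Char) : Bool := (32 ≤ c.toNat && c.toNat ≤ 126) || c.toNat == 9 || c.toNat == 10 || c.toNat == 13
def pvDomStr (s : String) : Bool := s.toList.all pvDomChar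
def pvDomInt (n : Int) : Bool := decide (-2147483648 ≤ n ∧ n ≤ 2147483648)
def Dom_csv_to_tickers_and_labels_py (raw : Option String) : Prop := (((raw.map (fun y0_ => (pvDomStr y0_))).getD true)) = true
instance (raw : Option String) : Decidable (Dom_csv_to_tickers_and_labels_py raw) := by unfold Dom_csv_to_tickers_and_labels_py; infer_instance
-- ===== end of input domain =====

-- ===== PORT A =====
-- B replaces A's split-on-comma/strip/partition-per-segment loop by a single character-level
-- state machine over raw + ',' (objective: alternative; same O(n) cost).
-- seg.partition(":") is ported by hand via takeWhile/dropWhile on the char list: exact for the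
-- single-character separator ':' (before = chars before the first ':', after = chars past it, [] if absent).

-- A's loop body, one segment at a time, over the state (tickers, labels).
def pvAStep (acc : List String × PySem.Dict String String) (rawSeg : List Char) :
    List String × PySem.Dict String String :=
  let seg := PySem.Chars.strip rawSeg
  if seg = [] then acc
  else if PySem.Chars.isIn [':'] seg then
    let code := PySem.Chars.upper (PySem.Chars.strip (seg.takeWhile (· ≠ ':')))
    let lbl := PySem.Chars.strip ((seg.dropWhile (· ≠ ':')).tail)
    if code = [] then acc
    else (acc.1 ++ [String.ofList code],
          if lbl = [] then acc.2 else acc.2.insert (String.ofList code) (String.ofList lbl))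
  else (acc.1 ++ [String.ofList (PySem.Chars.upper seg)], acc.2)

def csv_to_tickers_and_labels_py (raw : Option String) : List String × (List (String × String)) :=
  match raw with
  | none => ([], [])
  | some s =>
    if s.toList = [] then ([], [])   -- 'if not raw' on the empty string
    else
      let st := (PySem.Chars.splitOn s.toList [',']).foldl pvAStep ([], PySem.Dict.empty)
      (st.1, st.2.items)

-- ===== PORT B =====
-- B's loop body, one CHARACTER at a time, over the state
-- (tickers, labels, code_buf, lbl_buf, in_lbl); ',' flushes the pending segment.
def pvBStep (st : List String × PySem.Dict String String × List Char × List Char × Bool)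
    (ch : Char) : List String × PySem.Dict String String × List Char × List Char × Bool :=
  match st with
  | (tickers, labels, codeBuf, lblBuf, inLbl) =>
    if ch = ',' then
      let code := PySem.Chars.upper (PySem.Chars.strip codeBuf)
      if code = [] then (tickers, labels, [], [], false)
      else
        let lbl := PySem.Chars.strip lblBuf
        (tickers ++ [String.ofList code],
         if lbl = [] then labels else labels.insert (String.ofList code) (String.ofList lbl),
         [], [], false)
    else if ch = ':' ∧ inLbl = false then (tickers, labels, codeBuf, lblBuf, true)
    else if inLbl then (tickers, labels, codeBuf, lblBuf ++ [ch], inLbl)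
    else (tickers, labels, codeBuf ++ [ch], lblBuf, inLbl)

def csv_to_tickers_and_labels_py_alt (raw : Option String) : List String × (List (String × String)) :=
  match raw with
  | none => ([], [])
  | some s =>
    if s.toList = [] then ([], [])   -- 'if not raw' on the empty string
    else
      let st := (s.toList ++ [',']).foldl pvBStep ([], PySem.Dict.empty, [], [], false)
      (st.1, st.2.1.items)

-- ===== PRECONDITION & SPEC =====
def Spec_csv_to_tickers_and_labels_py (raw : Option String) (out : List String × (List (String × String))) : Prop := out = csv_to_tickers_and_labels_py_alt raw
instance (raw : Option String) (out : List String × (List (String × String))) : Decidable (Spec_csv_to_tickers_and_labels_py raw out) := by unfold Spec_csv_to_tickers_and_labels_py; infer_instance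

-- ===== CLAIM (what is proved, stated in full; the proofs are below) =====
def Claim_equal_csv_to_tickers_and_labels_py : Prop := ∀ (raw : Option String), Dom_csv_to_tickers_and_labels_py raw → Spec_csv_to_tickers_and_labels_py raw (csv_to_tickers_and_labels_py raw)

-- ===== LEMMAS AND PROOFS =====

-- Reference splitter: split on ',' by simple structural recursion (proved equal to splitOn).
def pvSplitRec : List Char → List (List Char)
  | [] => [[]]
  | c :: cs => if c = ',' then [] :: pvSplitRec cs else (pvSplitRec cs).modifyHead (c :: ·)

-- Pure buffer part of B's machine on a comma-free run of characters.
def pvScan (cb lb : List Char) (inl : Bool) : List Char → List Char × List Char × Bool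
  | [] => (cb, lb, inl)
  | c :: cs =>
    if c = ':' ∧ inl = false then pvScan cb lb true cs
    else if inl then pvScan cb (lb ++ [c]) inl cs
    else pvScan (cb ++ [c]) lb inl cs

-- B's flush of a scanned segment into (tickers, labels).
def pvFlushTD (td : List String × PySem.Dict String String) (b : List Char × List Char × Bool) :
    List String × PySem.Dict String String :=
  let code := PySem.Chars.upper (PySem.Chars.strip b.1)
  if code = [] then td
  else
    let lbl := PySem.Chars.strip b.2.1
    (td.1 ++ [String.ofList code],
     if lbl = [] then td.2 else td.2.insert (String.ofList code) (String.ofList lbl))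

-- B's machine restated segment-wise.
def pvSeg2 (st : List String × PySem.Dict String String × List Char × List Char × Bool)
    (seg : List Char) : List String × PySem.Dict String String × List Char × List Char × Bool :=
  let td := pvFlushTD (st.1, st.2.1) (pvScan st.2.2.1 st.2.2.2.1 st.2.2.2.2 seg)
  (td.1, td.2, [], [], false)

lemma pv_splitRec_ne_nil (cs : List Char) : pvSplitRec cs ≠ [] := by
  induction cs with
  | nil => simp [pvSplitRec]
  | cons c cs ih =>
    simp only [pvSplitRec]
    split_ifs
    · simp
    · cases h : pvSplitRec cs with
      | nil => exact absurd h ih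
      | cons a l => simp [List.modifyHead]

lemma pv_splitOn_go (fuel : Nat) : ∀ (l cur : List Char) (acc : List (List Char)),
    l.length < fuel →
    PySem.Chars.splitOn.go [','] fuel l cur acc =
      acc.reverse ++ (pvSplitRec l).modifyHead (cur.reverse ++ ·) := by
  induction fuel with
  | zero => intro l cur acc h; omega
  | succ fuel ih =>
    intro l cur acc h
    cases l with
    | nil => simp [PySem.Chars.splitOn.go, pvSplitRec, List.modifyHead]
    | cons c rest =>
      by_cases hc : c = ','
      · subst hc
        rw [show PySem.Chars.splitOn.go [','] (fuel+1) (',' :: rest) cur acc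
              = PySem.Chars.splitOn.go [','] fuel rest [] (cur.reverse :: acc) by
            simp [PySem.Chars.splitOn.go, List.isPrefixOf]]
        rw [ih rest [] (cur.reverse :: acc) (by simp at h; omega)]
        cases hsr : pvSplitRec rest with
        | nil => exact absurd hsr (pv_splitRec_ne_nil rest)
        | cons seg segs => simp [pvSplitRec, List.modifyHead, hsr]
      · rw [show PySem.Chars.splitOn.go [','] (fuel+1) (c :: rest) cur acc
              = PySem.Chars.splitOn.go [','] fuel rest (c :: cur) acc by
            simp [PySem.Chars.splitOn.go, List.isPrefixOf, Ne.symm hc]]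
        rw [ih rest (c :: cur) acc (by simp at h; omega)]
        simp only [pvSplitRec, if_neg hc]
        cases hsr : pvSplitRec rest with
        | nil => exact absurd hsr (pv_splitRec_ne_nil rest)
        | cons seg segs => simp [List.modifyHead]

lemma pv_splitOn_eq (cs : List Char) : PySem.Chars.splitOn cs [','] = pvSplitRec cs := by
  unfold PySem.Chars.splitOn
  rw [pv_splitOn_go (cs.length + 1) cs [] [] (by omega)]
  cases h : pvSplitRec cs with
  | nil => exact absurd h (pv_splitRec_ne_nil cs)
  | cons seg segs => simp [List.modifyHead]

-- whitespace characters are never ':'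
lemma pv_ws_ne (c : Char) (h : PySem.Chars.isspace c = true) : c ≠ ':' := by
  rintro rfl; revert h; decide

lemma pv_takeWhile_dropWhile_ws (s : List Char) :
    List.takeWhile (· ≠ ':') (List.dropWhile PySem.Chars.isspace s)
      = List.dropWhile PySem.Chars.isspace (List.takeWhile (· ≠ ':') s) := by
  induction s with
  | nil => simp
  | cons c cs ih =>
    by_cases hw : PySem.Chars.isspace c = true
    · have hp : c ≠ ':' := pv_ws_ne c hw
      rw [List.dropWhile_cons, if_pos hw, List.takeWhile_cons, if_pos (decide_eq_true hp),
        List.dropWhile_cons, if_pos hw]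
      exact ih
    · by_cases hp : c = ':'
      · subst hp
        rw [List.dropWhile_cons, if_neg hw, List.takeWhile_cons,
          if_neg (by simp : ¬(decide ((':' : Char) ≠ ':') = true))]
        simp
      · simp [List.dropWhile_cons, List.takeWhile_cons, hw, hp]

lemma pv_dropWhile_dropWhile_ws (s : List Char) :
    List.dropWhile (· ≠ ':') (List.dropWhile PySem.Chars.isspace s)
      = List.dropWhile (· ≠ ':') s := by
  induction s with
  | nil => simp
  | cons c cs ih =>
    by_cases hw : PySem.Chars.isspace c = true
    · have hp : c ≠ ':' := pv_ws_ne c hw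
      rw [List.dropWhile_cons, if_pos hw, List.dropWhile_cons, if_pos (decide_eq_true hp)]
      exact ih
    · simp [List.dropWhile_cons, hw]

lemma pv_rstrip_append_ws (y w : List Char) (hw : ∀ c ∈ w, PySem.Chars.isspace c = true) :
    PySem.Chars.rstrip (y ++ w) = PySem.Chars.rstrip y := by
  unfold PySem.Chars.rstrip
  rw [List.reverse_append, List.dropWhile_append]
  have hnil : List.dropWhile PySem.Chars.isspace w.reverse = [] := by
    rw [List.dropWhile_eq_nil_iff]
    intro c hc; exact hw c (by simpa using hc)
  simp [hnil]

lemma pv_strip_append_ws (y w : List Char) (hw : ∀ c ∈ w, PySem.Chars.isspace c = true) :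
    PySem.Chars.strip (y ++ w) = PySem.Chars.strip y := by
  unfold PySem.Chars.strip PySem.Chars.lstrip
  rw [List.dropWhile_append]
  by_cases h : (List.dropWhile PySem.Chars.isspace y).isEmpty = true
  · have hy : List.dropWhile PySem.Chars.isspace y = [] := by simpa using h
    have hwnil : List.dropWhile PySem.Chars.isspace w = [] := by
      rw [List.dropWhile_eq_nil_iff]; exact hw
    simp [h, hy, hwnil]
  · rw [if_neg h]
    exact pv_rstrip_append_ws _ w hw

-- stripping leading whitespace first changes nothing for strip
lemma pv_strip_dropWhile_ws (z : List Char) :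
    PySem.Chars.strip (List.dropWhile PySem.Chars.isspace z) = PySem.Chars.strip z := by
  unfold PySem.Chars.strip PySem.Chars.lstrip
  rw [List.dropWhile_idempotent]

-- decomposition of lstrip s as (rstrip (lstrip s)) ++ trailing whitespace
lemma pv_lstrip_decomp (s : List Char) :
    ∃ w, PySem.Chars.lstrip s = PySem.Chars.rstrip (PySem.Chars.lstrip s) ++ w ∧
      ∀ c ∈ w, PySem.Chars.isspace c = true := by
  refine ⟨(List.takeWhile PySem.Chars.isspace (PySem.Chars.lstrip s).reverse).reverse, ?_, ?_⟩
  · rw [show PySem.Chars.rstrip (PySem.Chars.lstrip s)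
        = (List.dropWhile PySem.Chars.isspace (PySem.Chars.lstrip s).reverse).reverse from rfl]
    conv_lhs => rw [← List.reverse_reverse (PySem.Chars.lstrip s),
      show ((PySem.Chars.lstrip s).reverse)
          = List.takeWhile PySem.Chars.isspace (PySem.Chars.lstrip s).reverse
            ++ List.dropWhile PySem.Chars.isspace (PySem.Chars.lstrip s).reverse from
        (List.takeWhile_append_dropWhile).symm]
    rw [List.reverse_append]
  · intro c hc
    exact List.mem_takeWhile_imp (by simpa using hc)

-- K1: stripping the segment before taking the pre-colon part does not change its stripped value
lemma pv_K1 (s : List Char) :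
    PySem.Chars.strip (List.takeWhile (· ≠ ':') (PySem.Chars.strip s))
      = PySem.Chars.strip (List.takeWhile (· ≠ ':') s) := by
  obtain ⟨w, hdec, hw⟩ := pv_lstrip_decomp s
  have hA : PySem.Chars.strip (List.takeWhile (· ≠ ':') (PySem.Chars.lstrip s))
      = PySem.Chars.strip (List.takeWhile (· ≠ ':') s) := by
    show PySem.Chars.strip (List.takeWhile (· ≠ ':') (List.dropWhile PySem.Chars.isspace s)) = _
    rw [pv_takeWhile_dropWhile_ws, pv_strip_dropWhile_ws]
  rw [← hA, show PySem.Chars.strip s = PySem.Chars.rstrip (PySem.Chars.lstrip s) from rfl]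
  conv_rhs => rw [hdec]
  rw [List.takeWhile_append]
  by_cases h : (List.takeWhile (· ≠ ':') (PySem.Chars.rstrip (PySem.Chars.lstrip s))).length
      = (PySem.Chars.rstrip (PySem.Chars.lstrip s)).length
  · have hty : List.takeWhile (· ≠ ':') (PySem.Chars.rstrip (PySem.Chars.lstrip s))
        = PySem.Chars.rstrip (PySem.Chars.lstrip s) :=
      (List.takeWhile_sublist _).eq_of_length h
    rw [if_pos h, hty]
    exact (pv_strip_append_ws _ _ (fun c hc => hw c ((List.takeWhile_sublist _).mem hc))).symm
  · rw [if_neg h]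

-- K2: stripping the segment before taking the post-colon part does not change its stripped value
lemma pv_K2 (s : List Char) :
    PySem.Chars.strip ((List.dropWhile (· ≠ ':') (PySem.Chars.strip s)).tail)
      = PySem.Chars.strip ((List.dropWhile (· ≠ ':') s).tail) := by
  obtain ⟨w, hdec, hw⟩ := pv_lstrip_decomp s
  have hA : PySem.Chars.strip ((List.dropWhile (· ≠ ':') (PySem.Chars.lstrip s)).tail)
      = PySem.Chars.strip ((List.dropWhile (· ≠ ':') s).tail) := by
    show PySem.Chars.strip ((List.dropWhile (· ≠ ':') (List.dropWhile PySem.Chars.isspace s)).tail) = _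
    rw [pv_dropWhile_dropWhile_ws]
  rw [← hA, show PySem.Chars.strip s = PySem.Chars.rstrip (PySem.Chars.lstrip s) from rfl]
  conv_rhs => rw [hdec]
  rw [List.dropWhile_append]
  by_cases h : (List.dropWhile (· ≠ ':') (PySem.Chars.rstrip (PySem.Chars.lstrip s))).isEmpty = true
  · have hy : List.dropWhile (· ≠ ':') (PySem.Chars.rstrip (PySem.Chars.lstrip s)) = [] := by
      simpa using h
    have hwnil : List.dropWhile (· ≠ ':') w = [] := by
      rw [List.dropWhile_eq_nil_iff]
      intro c hc; simpa using pv_ws_ne c (hw c hc)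
    rw [if_pos h, hy, hwnil]
  · rw [if_neg h, List.tail_append_of_ne_nil (by simpa using h)]
    exact (pv_strip_append_ws _ w hw).symm

-- scanning with the in-label flag set appends everything to the label buffer
lemma pv_scan_true (cs : List Char) : ∀ cb lb, pvScan cb lb true cs = (cb, lb ++ cs, true) := by
  induction cs with
  | nil => intro cb lb; simp [pvScan]
  | cons c cs ih => intro cb lb; simp [pvScan, ih]

-- full characterisation of the segment scan
lemma pv_scan_false (cs : List Char) : ∀ cb lb, pvScan cb lb false cs =
    (cb ++ List.takeWhile (· ≠ ':') cs, lb ++ (List.dropWhile (· ≠ ':') cs).tail,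
     decide ((':' : Char) ∈ cs)) := by
  induction cs with
  | nil => intro cb lb; simp [pvScan]
  | cons c cs ih =>
    intro cb lb
    by_cases hc : c = ':'
    · subst hc
      simp [pvScan, pv_scan_true, List.takeWhile_cons, List.dropWhile_cons]
    · rw [show pvScan cb lb false (c :: cs) = pvScan (cb ++ [c]) lb false cs by
          simp [pvScan, hc]]
      rw [ih, List.takeWhile_cons, if_pos (decide_eq_true hc), List.dropWhile_cons,
        if_pos (decide_eq_true hc)]
      simp [Ne.symm hc]

-- head of a nonempty prefix of a dropWhile-fixed list fails the predicate
lemma pv_dropWhile_head_false {p : Char → Bool} {t : List Char} {a : Char} {u' : List Char}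
    (hpref : a :: u' <+: t) (hdw : List.dropWhile p t = t) : p a = false := by
  have hne : t ≠ [] := by intro e; rw [e] at hpref; simp at hpref
  have hhead : a = t.head hne := by simpa using hpref.head (by simp)
  cases t with
  | nil => exact absurd rfl hne
  | cons b t' =>
    simp at hhead; subst hhead
    by_cases hb : p a
    · rw [List.dropWhile_cons, if_pos hb] at hdw
      have := congrArg List.length hdw
      simp at this
      have := List.length_dropWhile_le p t'
      omega
    · simpa using hb

lemma pv_strip_idem (s : List Char) :
    PySem.Chars.strip (PySem.Chars.strip s) = PySem.Chars.strip s := by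
  simp only [PySem.Chars.strip, PySem.Chars.lstrip, PySem.Chars.rstrip]
  set p := PySem.Chars.isspace with hp
  set t := List.dropWhile p s with ht
  set u := (List.dropWhile p t.reverse).reverse with hu
  have hdwt : List.dropWhile p t = t := List.dropWhile_idempotent p s
  have h1 : List.dropWhile p u = u := by
    cases hc : u with
    | nil => simp
    | cons a u' =>
      have hpref : a :: u' <+: t := by
        have h2 : (List.dropWhile p t.reverse).reverse <+: t.reverse.reverse :=
          (List.reverse_prefix).mpr (List.dropWhile_suffix p)
        rw [← hc, hu]
        simpa using h2
      have ha := pv_dropWhile_head_false hpref hdwt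
      simp [ha]
  rw [h1, hu]
  simp [List.dropWhile_idempotent]

-- B's flush of a freshly scanned segment is exactly A's per-segment step
lemma pv_seg_eq (td : List String × PySem.Dict String String) (seg : List Char) :
    pvFlushTD td (pvScan [] [] false seg) = pvAStep td seg := by
  rw [pv_scan_false]
  unfold pvFlushTD pvAStep
  by_cases h0 : PySem.Chars.strip seg = []
  · have hc : PySem.Chars.strip (List.takeWhile (· ≠ ':') seg) = [] := by
      rw [← pv_K1, h0]; rfl
    simp only [ne_eq, decide_not] at hc
    simp [h0, hc, PySem.Chars.upper]
  · by_cases hcol : PySem.Chars.isIn [':'] (PySem.Chars.strip seg) = true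
    · simp only [h0, if_neg h0, hcol, if_pos hcol, pv_K1, pv_K2]
      simp
    · have hmem : (':' : Char) ∉ PySem.Chars.strip seg := by
        intro hm
        exact hcol ((PySem.Chars.isIn_iff_infix _ _).mpr ((List.singleton_infix_iff ':' _).mpr hm))
      have htw : List.takeWhile (· ≠ ':') (PySem.Chars.strip seg) = PySem.Chars.strip seg := by
        rw [List.takeWhile_eq_self_iff]
        intro x hx
        simpa using fun he : x = ':' => hmem (he ▸ hx)
      have hdw : List.dropWhile (· ≠ ':') (PySem.Chars.strip seg) = [] := by
        rw [List.dropWhile_eq_nil_iff]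
        intro x hx
        simpa using fun he : x = ':' => hmem (he ▸ hx)
      have hcode : PySem.Chars.strip (List.takeWhile (· ≠ ':') seg) = PySem.Chars.strip seg := by
        rw [← pv_K1, htw, pv_strip_idem]
      have hlbl : PySem.Chars.strip ((List.dropWhile (· ≠ ':') seg).tail) = [] := by
        rw [← pv_K2, hdw]; rfl
      have hne : PySem.Chars.upper (PySem.Chars.strip seg) ≠ [] := by
        simpa [PySem.Chars.upper] using h0
      simp only [ne_eq, decide_not] at hcode hlbl
      simp [h0, hcol, hcode, hlbl, hne]

-- the three non-comma steps of B's machine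
lemma pv_bstep_colon (t : List String) (d : PySem.Dict String String) (cb lb : List Char) :
    pvBStep (t, d, cb, lb, false) ':' = (t, d, cb, lb, true) := by
  simp [pvBStep]

lemma pv_bstep_lbl (t : List String) (d : PySem.Dict String String) (cb lb : List Char)
    (c : Char) (hc : c ≠ ',') :
    pvBStep (t, d, cb, lb, true) c = (t, d, cb, lb ++ [c], true) := by
  simp [pvBStep, hc]

lemma pv_bstep_code (t : List String) (d : PySem.Dict String String) (cb lb : List Char)
    (c : Char) (hc : c ≠ ',') (hp : c ≠ ':') :
    pvBStep (t, d, cb, lb, false) c = (t, d, cb ++ [c], lb, false) := by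
  simp [pvBStep, hc, hp]

-- the ',' step of B's machine is exactly the flush of the current buffers
lemma pv_bstep_comma (t : List String) (d : PySem.Dict String String)
    (cb lb : List Char) (inl : Bool) :
    pvBStep (t, d, cb, lb, inl) ',' =
      ((pvFlushTD (t, d) (cb, lb, inl)).1, (pvFlushTD (t, d) (cb, lb, inl)).2, [], [], false) := by
  by_cases h : PySem.Chars.upper (PySem.Chars.strip cb) = [] <;>
    simp [pvBStep, pvFlushTD, h]

-- MAIN: B's character fold over cs ++ [','] is the segment-wise fold over pvSplitRec cs
lemma pv_main (cs : List Char) : ∀ (t : List String) (d : PySem.Dict String String)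
    (cb lb : List Char) (inl : Bool),
    (cs ++ [',']).foldl pvBStep (t, d, cb, lb, inl) =
      (pvSplitRec cs).foldl pvSeg2 (t, d, cb, lb, inl) := by
  induction cs with
  | nil =>
    intro t d cb lb inl
    rw [show pvSplitRec [] = [[]] from rfl]
    simp only [List.nil_append, List.foldl_cons, List.foldl_nil, pv_bstep_comma]
    rfl
  | cons c cs ih =>
    intro t d cb lb inl
    by_cases hc : c = ','
    · subst hc
      rw [show pvSplitRec (',' :: cs) = [] :: pvSplitRec cs by simp [pvSplitRec]]
      simp only [List.cons_append, List.foldl_cons, pv_bstep_comma]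
      rw [ih]
      rfl
    · cases hsr : pvSplitRec cs with
      | nil => exact absurd hsr (pv_splitRec_ne_nil cs)
      | cons seg segs =>
        rw [show pvSplitRec (c :: cs) = (c :: seg) :: segs by
          simp [pvSplitRec, hc, hsr, List.modifyHead]]
        cases inl with
        | true =>
          rw [List.cons_append, List.foldl_cons, pv_bstep_lbl t d cb lb c hc, ih, hsr,
            List.foldl_cons, List.foldl_cons]
          exact congrArg (fun st => List.foldl pvSeg2 st segs) (by simp [pvSeg2, pvScan])
        | false =>
          by_cases hp : c = ':'
          · subst hp
            rw [List.cons_append, List.foldl_cons, pv_bstep_colon t d cb lb, ih, hsr,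
              List.foldl_cons, List.foldl_cons]
            exact congrArg (fun st => List.foldl pvSeg2 st segs) (by simp [pvSeg2, pvScan])
          · rw [List.cons_append, List.foldl_cons, pv_bstep_code t d cb lb c hc hp, ih, hsr,
              List.foldl_cons, List.foldl_cons]
            exact congrArg (fun st => List.foldl pvSeg2 st segs) (by simp [pvSeg2, pvScan, hp])

-- segment-wise fold of B starting from empty buffers is A's fold
lemma pv_segfold (segs : List (List Char)) : ∀ (t : List String) (d : PySem.Dict String String),
    segs.foldl pvSeg2 (t, d, [], [], false) =
      ((segs.foldl pvAStep (t, d)).1, (segs.foldl pvAStep (t, d)).2, [], [], false) := by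
  induction segs with
  | nil => intro t d; simp
  | cons seg segs ih =>
    intro t d
    simp only [List.foldl_cons]
    rw [show pvSeg2 (t, d, [], [], false) seg
          = ((pvAStep (t, d) seg).1, (pvAStep (t, d) seg).2, [], [], false) by
        simp [pvSeg2, pv_seg_eq]]
    rw [ih]

-- ===== VERDICT (by name: the statement is the Claim_ definition above) =====
theorem csv_to_tickers_and_labels_py_spec : Claim_equal_csv_to_tickers_and_labels_py := by
  intro raw _
  unfold Spec_csv_to_tickers_and_labels_py csv_to_tickers_and_labels_py csv_to_tickers_and_labels_py_alt
  cases raw with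
  | none => rfl
  | some s =>
    by_cases h : s.toList = []
    · simp [h]
    · simp only [h, if_false]
      rw [pv_main, pv_segfold, pv_splitOn_eq]
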